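-- pv_equiv track=rewrite | github.com/HassounLab/PER_BRENDA | BRENDAParser.py | parseLiterature
-- ===== SOURCE A (Python) =====
-- def parseLiterature(entry):
--
-- 	#Adds an extra space so ending parenthesis is interprited
-- 	entry = entry + ' '
-- 	tempEntry = entry
--
-- 	#Finds last closing citation parenthesis
-- 	end_citation = [i for i in range(len(tempEntry)) if tempEntry.startswith('> ', i)]
-- 	if not end_citation:
-- 		return entry, None
--
-- 	#Finds last opening special parenthesis
-- 	start_citation = [i for i in range(len(tempEntry)) if tempEntry.startswith(' <', i)]
-- 	if not start_citation:
-- 		return entry, None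
--
-- 	#Literature are last indicies of find
-- 	refs = tempEntry[start_citation[-1]+2:end_citation[-1]]
--
-- 	#replace spaces with commas
-- 	refs = refs.replace(' ', ',')
--
-- 	#list by commas
-- 	refs = refs.split(',')
--
-- 	return entry[0:start_citation[-1]+1], refs
-- ===== SOURCE B (Python) =====
-- def parseLiterature(entry):
--     # One forward pass with a one-character lookbehind records the last positions of
--     # the two markers '> ' and ' <'; a hand-rolled tokenizer then splits the citation
--     # substring at every space or comma (what replace-then-split does), in a single pass.
--     entry = entry + ' '
--     e_pos = s_pos = -1
--     prev = None
--     i = 0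
--     for c in entry:
--         if prev == '>' and c == ' ':
--             e_pos = i - 1
--         elif prev == ' ' and c == '<':
--             s_pos = i - 1
--         prev = c
--         i += 1
--     if e_pos == -1 or s_pos == -1:
--         return entry, None
--     refs = []
--     tok = ''
--     for c in entry[s_pos + 2:e_pos]:
--         if c == ' ' or c == ',':
--             refs.append(tok)
--             tok = ''
--         else:
--             tok += c
--     refs.append(tok)
--     return entry[:s_pos + 1], refs
-- ===== Notes on version B (the rewrite author's own statement) =====
-- stated objective: faster
-- what changed: B replaces A's two whole-string list comprehensions (collecting every match position of each marker) plus replace-then-split with a single forward character scan using a one-character lookbehind that keeps only the last position of each marker in O(1) state, and a one-pass hand tokenizer that splits the citation substring at space or comma directly.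
import Mathlib
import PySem

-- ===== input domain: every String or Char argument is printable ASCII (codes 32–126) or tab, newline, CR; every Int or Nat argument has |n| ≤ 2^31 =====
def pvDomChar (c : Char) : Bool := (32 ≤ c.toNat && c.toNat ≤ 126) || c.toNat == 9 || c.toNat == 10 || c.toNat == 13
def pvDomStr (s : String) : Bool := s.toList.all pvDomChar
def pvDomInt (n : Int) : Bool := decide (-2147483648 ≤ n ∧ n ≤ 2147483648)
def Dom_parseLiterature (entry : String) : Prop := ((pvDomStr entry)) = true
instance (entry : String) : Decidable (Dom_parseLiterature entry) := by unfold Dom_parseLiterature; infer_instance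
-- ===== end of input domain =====

-- B replaces A's two full-string match-position list comprehensions and replace-then-split
-- with one forward scan (one-char lookbehind, O(1) state) plus a one-pass hand tokenizer.

-- ===== PORT A =====
-- Python s.startswith(p, i) with 0 ≤ i is ported exactly as p prefix of s[i:] (Str.startswith on Str.slice)
def parseLiterature (entry0 : String) : String × Option (List String) :=
  let entry := entry0 ++ " "
  let tempEntry := entry
  let end_citation := (PySem.List.pyRange 0 (PySem.Str.len tempEntry) 1).filter
      (fun i => PySem.Str.startswith (PySem.Str.slice tempEntry (some i) none) "> ")
  if end_citation = [] then (entry, none)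
  else
    let start_citation := (PySem.List.pyRange 0 (PySem.Str.len tempEntry) 1).filter
        (fun i => PySem.Str.startswith (PySem.Str.slice tempEntry (some i) none) " <")
    if start_citation = [] then (entry, none)
    else
      -- end_citation[-1] / start_citation[-1]: lists are guarded non-empty, so pyGet? is some
      let e := (PySem.List.pyGet? end_citation (-1)).getD 0
      let s := (PySem.List.pyGet? start_citation (-1)).getD 0
      let refs := PySem.Str.slice tempEntry (some (s + 2)) (some e)
      let refs := PySem.Str.replace refs " " ","
      let refs := (PySem.Str.split? refs ",").getD []   -- separator "," ≠ "", so split? is some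
      (PySem.Str.slice entry (some 0) (some (s + 1)), some refs)

-- ===== PORT B =====
-- the for-loop over the characters: prev is Python's `prev` (None at the start),
-- the two accumulators are e_pos and s_pos, i is the running index
def pvScan (cs : List Char) (i : Int) (prev : Option Char) (e s : Int) : Int × Int :=
  match cs with
  | [] => (e, s)
  | c :: rest =>
    if prev = some '>' ∧ c = ' ' then pvScan rest (i + 1) (some c) (i - 1) s
    else if prev = some ' ' ∧ c = '<' then pvScan rest (i + 1) (some c) e (i - 1)
    else pvScan rest (i + 1) (some c) e s

-- the second for-loop: split at space or comma accumulating the current token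
def pvTok (cs : List Char) (tok : List Char) (acc : List (List Char)) : List (List Char) :=
  match cs with
  | [] => acc ++ [tok]
  | c :: rest =>
    if c = ' ' ∨ c = ',' then pvTok rest [] (acc ++ [tok])
    else pvTok rest (tok ++ [c]) acc

def parseLiterature_alt (entry0 : String) : String × Option (List String) :=
  let entry := entry0 ++ " "
  let es := pvScan entry.toList 0 none (-1) (-1)
  if es.1 = -1 ∨ es.2 = -1 then (entry, none)
  else
    let refs := (pvTok (PySem.Str.slice entry (some (es.2 + 2)) (some es.1)).toList [] []).map String.ofList
    (PySem.Str.slice entry none (some (es.2 + 1)), some refs)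

-- ===== PRECONDITION & SPEC =====
def Spec_parseLiterature (entry : String) (out : String × Option (List String)) : Prop := out = parseLiterature_alt entry
instance (entry : String) (out : String × Option (List String)) : Decidable (Spec_parseLiterature entry out) := by unfold Spec_parseLiterature; infer_instance

-- ===== CLAIM =====
def Claim_equal_parseLiterature : Prop := ∀ (entry : String), Dom_parseLiterature entry → Spec_parseLiterature entry (parseLiterature entry)

-- ===== LEMMAS AND PROOFS =====

-- the Nat positions at which p occurs in s, in increasing order, below bound n (A's comprehension)
def pvMatches (s p : List Char) (n : Nat) : List Nat :=
  (List.range n).filter (fun i => p.isPrefixOf (s.drop i))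

-- the position of the LAST occurrence of p, by structural recursion (the bridge between the sides)
def pvLastMk (p : List Char) : List Char → Option Nat
  | [] => none
  | c :: rest =>
    match pvLastMk p rest with
    | some k => some (k + 1)
    | none => if p.isPrefixOf (c :: rest) then some 0 else none

-- pvLastMk extended with the scan's lookbehind character (a match may start at the prev char, offset -1)
def pvLastMkP (a b : Char) (prev : Option Char) (cs : List Char) : Option Int :=
  match pvLastMk [a, b] cs with
  | some k => some (k : Int)
  | none =>
    match prev, cs with
    | some p, c :: _ => if p = a ∧ c = b then some (-1) else none
    | _, _ => none

theorem pvMatches_cons (c : Char) (rest p : List Char) (n : Nat) :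
    pvMatches (c :: rest) p (n + 1) =
      (if p.isPrefixOf (c :: rest) then [0] else []) ++ (pvMatches rest p n).map (· + 1) := by
  simp only [pvMatches, List.range_succ_eq_map, List.filter_cons, List.filter_map, List.drop_zero]
  split_ifs with h <;> simp [Function.comp_def]

theorem matches_getLast (p : List Char) : ∀ cs : List Char,
    (pvMatches cs p cs.length).getLast? = pvLastMk p cs := by
  intro cs
  induction cs with
  | nil => simp [pvMatches, pvLastMk]
  | cons c rest ih =>
    rw [List.length_cons, pvMatches_cons, pvLastMk]
    rcases h : pvLastMk p rest with _ | k
    · have hnil : pvMatches rest p rest.length = [] := by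
        have := ih; rw [h] at this; exact List.getLast?_eq_none_iff.mp this
      rw [hnil]
      split_ifs with hp <;> simp
    · have hlast : (pvMatches rest p rest.length).getLast? = some k := by rw [ih, h]
      rcases List.eq_nil_or_concat (pvMatches rest p rest.length) with hnil | ⟨ys, y, hy⟩
      · rw [hnil] at hlast; simp at hlast
      · rw [hy] at hlast ⊢
        simp at hlast
        simp [hlast]

theorem pvScanKey (c : Char) (rest : List Char) (a b : Char) (prev : Option Char) (i x : Int) :
    (pvLastMkP a b (some c) rest).elim (if prev = some a ∧ c = b then i - 1 else x) (fun k => i + 1 + k)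
      = (pvLastMkP a b prev (c :: rest)).elim x (fun k => i + k) := by
  rcases hr : pvLastMk [a, b] rest with _ | k
  · rcases rest with _ | ⟨d, r'⟩
    · have h1 : ¬ ([a, b] <+: [c]) := by intro h; simpa using h.length_le
      simp only [pvLastMkP, pvLastMk, List.isPrefixOf_iff_prefix, h1, if_false]
      rcases prev with _ | p
      · simp
      · by_cases hp : p = a ∧ c = b <;> simp [hp] <;> omega
    · have hpre : ([a, b] <+: (c :: d :: r')) ↔ (c = a ∧ d = b) := by
        constructor
        · rintro ⟨t, ht⟩
          simp only [List.cons_append, List.nil_append, List.cons.injEq] at ht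
          exact ⟨ht.1.symm, ht.2.1.symm⟩
        · rintro ⟨rfl, rfl⟩; exact ⟨r', by simp⟩
      have hm : pvLastMk [a, b] (c :: d :: r') = if c = a ∧ d = b then some 0 else none := by
        simp only [pvLastMk, List.isPrefixOf_iff_prefix] at hr ⊢
        rw [hr]
        simp [hpre]
      by_cases hcd : c = a ∧ d = b
      · simp only [pvLastMkP, hr, hm, if_pos hcd]
        simp [hcd] <;> omega
      · simp only [pvLastMkP, hr, hm, if_neg hcd]
        rcases prev with _ | p
        · simp
        · by_cases hp : p = a ∧ c = b <;> simp [hp] <;> omega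
  · simp [pvLastMkP, pvLastMk, hr]
    omega

theorem pvScan_eq : ∀ (cs : List Char) (prev : Option Char) (i e s : Int),
    pvScan cs i prev e s =
      ((pvLastMkP '>' ' ' prev cs).elim e (fun k => i + k),
       (pvLastMkP ' ' '<' prev cs).elim s (fun k => i + k)) := by
  intro cs
  induction cs with
  | nil => intro prev i e s; simp [pvScan, pvLastMkP, pvLastMk]
  | cons c rest ih =>
    intro prev i e s
    have hstep : pvScan (c :: rest) i prev e s
        = pvScan rest (i + 1) (some c)
            (if prev = some '>' ∧ c = ' ' then i - 1 else e)
            (if prev = some ' ' ∧ c = '<' then i - 1 else s) := by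
      by_cases h1 : prev = some '>' ∧ c = ' '
      · have h2 : ¬ (prev = some ' ' ∧ c = '<') := by
          rintro ⟨hp, _⟩; rw [h1.1] at hp; simp at hp
        rw [pvScan, if_pos h1]
        rw [if_pos h1, if_neg h2]
      · rw [pvScan, if_neg h1, if_neg h1]
        by_cases h2 : prev = some ' ' ∧ c = '<'
        · rw [if_pos h2, if_pos h2]
        · rw [if_neg h2, if_neg h2]
    rw [hstep, ih, pvScanKey c rest '>' ' ' prev i e, pvScanKey c rest ' ' '<' prev i s]

theorem pyGet_neg_one {α : Type} (xs : List α) : PySem.List.pyGet? xs (-1) = xs.getLast? := by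
  cases xs with
  | nil => simp [PySem.List.pyGet?, PySem.List.pyIdx?]
  | cons a t => simp [PySem.List.pyGet?, PySem.List.pyIdx?, List.getLast?_eq_getElem?]

-- A's comprehension equals the cast image of pvMatches
theorem citation_list_eq (s : String) (p : String) :
    (PySem.List.pyRange 0 (PySem.Str.len s) 1).filter
        (fun i => PySem.Str.startswith (PySem.Str.slice s (some i) none) p)
      = (pvMatches s.toList p.toList s.toList.length).map (fun k : Nat => (k : Int)) := by
  have hpred : (fun x : Nat => PySem.Str.startswith (PySem.Str.slice s (some (x : Int)) none) p)
      = (fun i : Nat => p.toList.isPrefixOf (s.toList.drop i)) := by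
    funext i
    simp [PySem.Str.startswith_eq, PySem.Str.toList_slice, PySem.Chars.slice_eq_listSlice,
      PySem.List.slice_from_natCast, PySem.Chars.startswith]
  rw [PySem.List.pyRange_one, List.filter_map]
  simp only [zero_add, Function.comp_def, Int.sub_zero, PySem.Str.len_eq, Int.toNat_natCast]
  unfold pvMatches
  rw [hpred]

theorem zero_slice (s : String) (b : Option Int) :
    PySem.Str.slice s (some 0) b = PySem.Str.slice s none b := by
  unfold PySem.Str.slice
  rw [PySem.Chars.slice_eq_listSlice, PySem.Chars.slice_eq_listSlice, PySem.List.slice_zero_start]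

-- ' ' ↦ ',' pointwise (what A's replace does)
def pvSub (c : Char) : Char := if c = ' ' then ',' else c

theorem replace_go_map : ∀ (cs acc : List Char) (fuel : Nat), cs.length ≤ fuel →
    PySem.Chars.replace.go [' '] [','] fuel cs acc = acc.reverse ++ cs.map pvSub := by
  intro cs
  induction cs with
  | nil => intro acc fuel _; cases fuel <;> simp [PySem.Chars.replace.go]
  | cons c rest ih =>
    intro acc fuel hf
    cases fuel with
    | zero => simp at hf
    | succ f =>
      rw [PySem.Chars.replace.go]
      by_cases hc : c = ' '
      · rw [if_pos (by simp [hc, List.isPrefixOf])]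
        simp only [List.length_singleton, List.drop_one, List.tail_cons, List.reverse_singleton,
          List.singleton_append]
        rw [ih (',' :: acc) f (by simpa using hf)]
        simp [hc, pvSub]
      · rw [if_neg (by simp [List.isPrefixOf]; exact Ne.symm hc)]
        rw [ih _ f (by simpa using hf)]
        simp [pvSub, hc]

theorem replace_space_comma (cs : List Char) :
    PySem.Chars.replace cs [' '] [','] = cs.map pvSub := by
  rw [PySem.Chars.replace]
  simp only [List.isEmpty_cons, Bool.false_eq_true, if_false]
  exact replace_go_map cs [] cs.length le_rfl

theorem pvTok_acc : ∀ (cs tok : List Char) (acc : List (List Char)),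
    pvTok cs tok acc = acc ++ pvTok cs tok [] := by
  intro cs
  induction cs with
  | nil => intro tok acc; simp [pvTok]
  | cons c rest ih =>
    intro tok acc
    rw [pvTok, pvTok]
    split_ifs with h
    · rw [ih [] (acc ++ [tok]), ih [] ([] ++ [tok])]; simp
    · rw [ih (tok ++ [c]) acc]

theorem splitOn_go_tok : ∀ (cs : List Char) (fuel : Nat) (tok : List Char) (acc : List (List Char)),
    cs.length < fuel →
    PySem.Chars.splitOn.go [','] fuel (cs.map pvSub) tok.reverse acc
      = acc.reverse ++ pvTok cs tok [] := by
  intro cs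
  induction cs with
  | nil =>
    intro fuel tok acc hf
    cases fuel with
    | zero => omega
    | succ f => simp [PySem.Chars.splitOn.go, pvTok]
  | cons c rest ih =>
    intro fuel tok acc hf
    cases fuel with
    | zero => omega
    | succ f =>
      simp only [List.map_cons]
      rw [PySem.Chars.splitOn.go]
      by_cases hc : c = ' ' ∨ c = ','
      · have hsub : pvSub c = ',' := by rcases hc with h | h <;> simp [pvSub, h]
        rw [if_pos (by simp [hsub, List.isPrefixOf])]
        simp only [List.length_singleton, hsub]
        have := ih f [] (tok :: acc) (by simpa using hf)
        simp only [List.reverse_nil] at this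
        rw [List.drop_one, List.tail_cons, List.reverse_reverse, this]
        rw [pvTok, if_pos hc, pvTok_acc rest [] ([] ++ [tok])]
        simp
      · have hsub : pvSub c = c := by
          simp only [pvSub]; rw [if_neg (fun h => hc (Or.inl h))]
        rw [if_neg (by simp [hsub, List.isPrefixOf]; intro h; exact hc (Or.inr h.symm))]
        rw [hsub]
        have : (c :: tok.reverse) = (tok ++ [c]).reverse := by simp
        rw [this, ih f (tok ++ [c]) acc (by simpa using hf)]
        rw [pvTok, if_neg hc]

theorem refs_eq (s : String) :
    ((PySem.Str.split? (PySem.Str.replace s " " ",") ",").getD [])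
      = (pvTok s.toList [] []).map String.ofList := by
  rw [PySem.Str.split?]
  rw [PySem.Chars.split?]
  rw [if_neg (by simp)]
  simp only [Option.map_some, Option.getD_some]
  have hrep : (PySem.Str.replace s " " ",").toList = s.toList.map pvSub := by
    rw [PySem.Str.toList_replace]
    have : (" " : String).toList = [' '] := by decide
    have h2 : ("," : String).toList = [','] := by decide
    rw [this, h2, replace_space_comma]
  rw [hrep]
  rw [PySem.Chars.splitOn]
  have h1 : (s.toList.map pvSub).length = s.toList.length := by simp
  have := splitOn_go_tok s.toList (s.toList.length + 1) [] [] (by omega)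
  simp only [List.reverse_nil] at this
  have h3 : ("," : String).toList = [','] := by decide
  rw [h3, h1, this]
  simp

-- ===== VERDICT (by name: the statement is the Claim_ definition above) =====
theorem parseLiterature_spec : Claim_equal_parseLiterature := by
  intro entry0 _
  unfold Spec_parseLiterature
  simp only [parseLiterature, parseLiterature_alt]
  rw [citation_list_eq (entry0 ++ " ") "> ", citation_list_eq (entry0 ++ " ") " <",
    pvScan_eq]
  have hE : ("> " : String).toList = ['>', ' '] := by decide
  have hS : (" <" : String).toList = [' ', '<'] := by decide
  rw [hE, hS]
  simp only [pvLastMkP]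
  generalize hme : pvLastMk ['>', ' '] (entry0 ++ " ").toList = ME
  generalize hms : pvLastMk [' ', '<'] (entry0 ++ " ").toList = MS
  have hEl : (pvMatches (entry0 ++ " ").toList ['>', ' '] (entry0 ++ " ").toList.length).getLast? = ME := by
    rw [matches_getLast]; exact hme
  have hSl : (pvMatches (entry0 ++ " ").toList [' ', '<'] (entry0 ++ " ").toList.length).getLast? = MS := by
    rw [matches_getLast]; exact hms
  rcases ME with _ | kE
  · -- no end marker: A returns early; B's first component is -1
    have : pvMatches (entry0 ++ " ").toList ['>', ' '] (entry0 ++ " ").toList.length = [] :=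
      List.getLast?_eq_none_iff.mp hEl
    rw [this]
    simp
  · rcases MS with _ | kS
    · have : pvMatches (entry0 ++ " ").toList [' ', '<'] (entry0 ++ " ").toList.length = [] :=
        List.getLast?_eq_none_iff.mp hSl
      rw [this]
      have hne : (pvMatches (entry0 ++ " ").toList ['>', ' '] (entry0 ++ " ").toList.length) ≠ [] := by
        intro h; rw [h] at hEl; simp at hEl
      rw [if_neg (by simpa using hne)]
      simp
    · have hneE : (pvMatches (entry0 ++ " ").toList ['>', ' '] (entry0 ++ " ").toList.length) ≠ [] := by
        intro h; rw [h] at hEl; simp at hEl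
      have hneS : (pvMatches (entry0 ++ " ").toList [' ', '<'] (entry0 ++ " ").toList.length) ≠ [] := by
        intro h; rw [h] at hSl; simp at hSl
      rw [if_neg (by simpa using hneE), if_neg (by simpa using hneS)]
      rw [pyGet_neg_one, pyGet_neg_one, List.getLast?_map, List.getLast?_map, hEl, hSl]
      simp only [Option.map_some, Option.getD_some, Option.elim_some]
      rw [if_neg (by simp)]
      rw [refs_eq, zero_slice]
      simp [add_comm]
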